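-- pv_equiv track=rewrite | github.com/Alfonso-Fierro/JSSP-Solutions | Soluciones Iniciales/Código/selection.py | insertion_order
-- ===== SOURCE A (Python) =====
-- def insertion_order(ranked):
--     """return list of indices with jobs to process"""
--     indxs = [] #Order of jobs to enter in the machines
--     u = len(ranked)
--     while ranked[-1]:
--         for i in range(u):
--             if ranked[i]:
--                 indxs.append(ranked[i][0])
--                 ranked[i]=ranked[i][1:]
--     return indxs
-- ===== SOURCE B (Python) =====
-- def insertion_order(ranked):
--     """return list of indices with jobs to process"""
--     L = len(ranked[-1])
--     indxs = [row[k] for k in range(L) for row in ranked if k < len(row)]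
--     ranked[:] = [row[L:] for row in ranked]
--     return indxs
-- ===== Notes on version B (the rewrite author's own statement) =====
-- stated objective: simpler
-- what changed: A's while-loop of repeated front-peeling rounds (rebuilding every row each round) is replaced by one direct column-major flatten: compute L = len(ranked[-1]) once and read row[k] for k in range(L) straight out of the untouched rows, then mutate ranked once with row[L:] tails.
import Mathlib
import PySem

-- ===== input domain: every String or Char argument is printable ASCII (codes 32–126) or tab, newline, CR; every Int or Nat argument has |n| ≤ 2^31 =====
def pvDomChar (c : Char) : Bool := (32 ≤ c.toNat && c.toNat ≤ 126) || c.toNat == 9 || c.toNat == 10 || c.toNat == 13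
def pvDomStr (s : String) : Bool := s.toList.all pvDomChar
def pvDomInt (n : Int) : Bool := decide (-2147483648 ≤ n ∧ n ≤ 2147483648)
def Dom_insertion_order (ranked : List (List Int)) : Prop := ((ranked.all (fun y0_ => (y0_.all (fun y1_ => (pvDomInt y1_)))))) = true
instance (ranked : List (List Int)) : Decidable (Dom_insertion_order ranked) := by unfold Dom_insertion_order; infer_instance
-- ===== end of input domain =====

-- B replaces A's repeated front-peeling rounds by a single direct column-major flatten
-- (objective: simpler). Both mutate `ranked` in place in Python (A peels fronts, B assigns
-- the row[L:] tails, observably the same); the equivalence proved here is about the RETURN value only.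


-- ===== PORT A =====
-- body of A's inner `for i in range(u)` loop
def pvStepA (st : List (List Int) × List Int) (i : Int) : List (List Int) × List Int :=
  match PySem.List.pyGet? st.1 i with
  | some (x :: xs) => (PySem.List.pySetD st.1 i xs, st.2 ++ [x])   -- if ranked[i]: append head, drop it
  | _ => st                                                        -- empty row (or, vacuously, bad index): skip

-- one pass of A's inner loop; `u = len(ranked)` is constant through A's execution
-- (item assignment preserves length), so we pass the current list's length.
def pvRoundA (r : List (List Int)) (acc : List Int) : List (List Int) × List Int :=
  (PySem.List.pyRange 0 (r.length : Int) 1).foldl pvStepA (r, acc)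

theorem pvStepA_get_cons {st : List (List Int) × List Int} {i : Int} {x : Int} {xs : List Int}
    (h : PySem.List.pyGet? st.1 i = some (x :: xs)) :
    pvStepA st i = (PySem.List.pySetD st.1 i xs, st.2 ++ [x]) := by
  unfold pvStepA; split <;> simp_all

theorem pvStepA_get_nil {st : List (List Int) × List Int} {i : Int}
    (h : PySem.List.pyGet? st.1 i = some []) : pvStepA st i = st := by
  unfold pvStepA; split <;> simp_all

-- closed form of one round, needed for termination of the while-loop below
theorem pvRoundA_eq (r : List (List Int)) (acc : List Int) :
    pvRoundA r acc = (r.map List.tail, acc ++ r.filterMap List.head?) := by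
  suffices h : ∀ (s p : List (List Int)) (acc : List Int),
      (PySem.List.pyRange (p.length : Int) ((p.length + s.length : Nat) : Int) 1).foldl
        pvStepA (p ++ s, acc) = (p ++ s.map List.tail, acc ++ s.filterMap List.head?) by
    have := h r [] acc
    simpa [pvRoundA] using this
  intro s
  induction s with
  | nil =>
      intro p acc
      simp [PySem.List.pyRange_one_eq_nil]
  | cons row s ih =>
      intro p acc
      rw [PySem.List.pyRange_one_cons (by push_cast [List.length_cons]; omega)]
      simp only [List.foldl_cons]
      have hget : PySem.List.pyGet? ((p ++ row :: s, acc) : List (List Int) × List Int).1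
          ((p.length : Nat) : Int) = some row := PySem.List.pyGet?_append_length p s row
      cases row with
      | nil =>
          rw [pvStepA_get_nil hget]
          have h1 : ((p.length : Int) + 1) = (((p ++ [([] : List Int)]).length : Nat) : Int) := by
            simp only [List.length_append, List.length_cons, List.length_nil]; push_cast; ring
          have h2 : ((p.length + (([] : List Int) :: s).length : Nat) : Int)
              = (((p ++ [([] : List Int)]).length + s.length : Nat) : Int) := by
            simp only [List.length_append, List.length_cons, List.length_nil]; push_cast; ring
          rw [h1, h2]
          have h3 : p ++ ([] : List Int) :: s = (p ++ [([] : List Int)]) ++ s := by simp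
          rw [h3]
          have := ih (p ++ [([] : List Int)]) acc
          rw [this]
          simp
      | cons x xs =>
          rw [pvStepA_get_cons hget]
          have hset : PySem.List.pySetD ((p ++ (x :: xs) :: s, acc) : List (List Int) × List Int).1
              ((p.length : Nat) : Int) xs = (p ++ [xs]) ++ s := by
            rw [PySem.List.pySetD_natCast, List.set_append_right _ _ (Nat.le_refl _)]
            simp
          rw [hset]
          have h1 : ((p.length : Int) + 1) = (((p ++ [xs]).length : Nat) : Int) := by
            simp only [List.length_append, List.length_cons, List.length_nil]; push_cast; ring
          have h2 : ((p.length + ((x :: xs) :: s).length : Nat) : Int)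
              = (((p ++ [xs]).length + s.length : Nat) : Int) := by
            simp only [List.length_append, List.length_cons, List.length_nil]; push_cast; ring
          rw [h1, h2]
          have := ih (p ++ [xs]) (acc ++ [x])
          rw [this]
          simp

-- A's while-loop. On ranked = [] Python raises IndexError at `ranked[-1]` (pyGet? = none);
-- that input is excluded by Pre_ below.
def pvLoopA (r : List (List Int)) (acc : List Int) : List Int :=
  match h : PySem.List.pyGet? r (-1) with
  | none => acc                 -- IndexError in Python: outside Pre_
  | some [] => acc              -- while-guard false
  | some (_ :: _) =>
      let st := pvRoundA r acc
      pvLoopA st.1 st.2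
termination_by (r.getLastD []).length
decreasing_by
  have hl : r.getLast? = some (‹_› :: ‹_›) := by
    rw [← PySem.List.pyGet?_neg_one]; exact h
  simp only [pvRoundA_eq]
  have : (r.map List.tail).getLast? = some ((‹_› :: ‹_›) : List Int).tail := by
    rw [List.getLast?_map, hl]; rfl
  rw [List.getLastD_eq_getLast?, List.getLastD_eq_getLast?, this, hl]
  simp

def insertion_order (ranked : List (List Int)) : List Int :=
  pvLoopA ranked []

-- ===== PORT B =====
def insertion_order_alt (ranked : List (List Int)) : List Int :=
  match PySem.List.pyGet? ranked (-1) with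
  | none => []                  -- IndexError in Python (ranked = []): outside Pre_
  | some last =>
      let L : Int := (last.length : Int)
      (PySem.List.pyRange 0 L 1).flatMap (fun k =>
        ranked.filterMap (fun row =>
          if k < (row.length : Int) then PySem.List.pyGet? row k else none))

-- ===== PRECONDITION & SPEC =====
-- Pre_ excludes exactly the empty list, on which Python A raises IndexError at `ranked[-1]`.
def Pre_insertion_order (ranked : List (List Int)) : Prop := ranked ≠ []
instance (ranked : List (List Int)) : Decidable (Pre_insertion_order ranked) := by
  unfold Pre_insertion_order; infer_instance
def pvWitness_insertion_order : List (List Int) := [[1, 2], [3], [4, 5]]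

def Spec_insertion_order (ranked : List (List Int)) (out : List Int) : Prop := out = insertion_order_alt ranked
instance (ranked : List (List Int)) (out : List Int) : Decidable (Spec_insertion_order ranked out) := by unfold Spec_insertion_order; infer_instance

-- ===== CLAIM (what is proved, stated in full; the proofs are below) =====
def Claim_equal_insertion_order : Prop := ∀ (ranked : List (List Int)), Dom_insertion_order ranked → Pre_insertion_order ranked → Spec_insertion_order ranked (insertion_order ranked)

-- ===== LEMMAS AND PROOFS =====

-- the column-major interleave both programs compute, as a recursion on the column count
def pvCols (r : List (List Int)) : Nat → List Int
  | 0 => []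
  | L + 1 => r.filterMap List.head? ++ pvCols (r.map List.tail) L

theorem pvCols_eq_flatMap (L : Nat) :
    ∀ r : List (List Int),
      (List.range L).flatMap (fun k => r.filterMap (fun row => row[k]?)) = pvCols r L := by
  induction L with
  | zero => intro r; simp [pvCols]
  | succ L ih =>
      intro r
      rw [List.range_succ_eq_map]
      simp only [List.flatMap_cons, List.flatMap_map]
      have hcol : ∀ k : Nat,
          r.filterMap (fun row => row[k + 1]?)
            = (r.map List.tail).filterMap (fun row => row[k]?) := by
        intro k
        rw [List.filterMap_map]
        congr 1; funext row; cases row <;> simp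
      have h0 : r.filterMap (fun row => row[0]?) = r.filterMap List.head? := by
        congr 1; funext row; cases row <;> simp
      rw [h0]
      have : (List.range L).flatMap (fun k => r.filterMap fun row => row[k + 1]?)
          = (List.range L).flatMap (fun k => (r.map List.tail).filterMap fun row => row[k]?) := by
        congr 1; funext k; exact hcol k
      rw [this, ih (r.map List.tail)]
      rfl

theorem pvLoopA_eq (L : Nat) :
    ∀ (r : List (List Int)) (acc : List Int) (last : List Int),
      r.getLast? = some last → last.length = L → pvLoopA r acc = acc ++ pvCols r L := by
  induction L with
  | zero =>
      intro r acc last hlast hlen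
      have hnil : last = [] := List.eq_nil_of_length_eq_zero hlen
      rw [pvLoopA]
      rw [show PySem.List.pyGet? r (-1) = some ([] : List Int) by
        rw [PySem.List.pyGet?_neg_one, hlast, hnil]]
      simp [pvCols]
  | succ L ih =>
      intro r acc last hlast hlen
      obtain ⟨x, xs, rfl⟩ : ∃ x xs, last = x :: xs := by
        cases last with
        | nil => simp at hlen
        | cons a b => exact ⟨a, b, rfl⟩
      rw [pvLoopA]
      rw [show PySem.List.pyGet? r (-1) = some (x :: xs) by
        rw [PySem.List.pyGet?_neg_one, hlast]]
      simp only [pvRoundA_eq]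
      have htail : (r.map List.tail).getLast? = some xs := by
        rw [List.getLast?_map, hlast]; rfl
      have := ih (r.map List.tail) (acc ++ r.filterMap List.head?) xs htail (by simpa using hlen)
      rw [this]
      simp [pvCols]

theorem alt_eq_pvCols (r : List (List Int)) (last : List Int)
    (hlast : r.getLast? = some last) :
    insertion_order_alt r = pvCols r last.length := by
  unfold insertion_order_alt
  rw [show PySem.List.pyGet? r (-1) = some last by
    rw [PySem.List.pyGet?_neg_one, hlast]]
  simp only []
  rw [PySem.List.pyRange_one]
  simp only [Int.sub_zero, Int.toNat_natCast, List.flatMap_map]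
  rw [← pvCols_eq_flatMap]
  congr 1; funext k
  congr 1; funext row
  have : ((0 : Int) + (k : Int)) = ((k : Nat) : Int) := by omega
  rw [this, PySem.List.pyGet?_natCast]
  by_cases hk : k < row.length
  · rw [if_pos (by exact_mod_cast hk)]
  · rw [if_neg (by exact_mod_cast hk), List.getElem?_eq_none (by omega)]

-- ===== VERDICT (by name: the statement is the Claim_ definition above) =====
theorem insertion_order_spec : Claim_equal_insertion_order := by
  intro ranked _ hpre
  unfold Spec_insertion_order insertion_order
  obtain ⟨last, hlast⟩ : ∃ last, ranked.getLast? = some last := by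
    cases h : ranked.getLast? with
    | none => exact absurd (List.getLast?_eq_none_iff.mp h) hpre
    | some l => exact ⟨l, rfl⟩
  rw [pvLoopA_eq last.length ranked [] last hlast rfl, alt_eq_pvCols ranked last hlast]
  simp
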